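-- pv_equiv track=rewrite | github.com/taojian-feng/gen-ai | agents/field-design-package-sendreminders/lambda-code/sendEmailInsfdp.py | outstanding_paperwork
-- ===== SOURCE A (Python) =====
-- def outstanding_paperwork(parameters):
--     for parameter in parameters:
--         if parameter.get("value", None) == "x-857":
--             return {
--                 "response": {
--                     "pendingDocuments": "Vendor Drawing"
--                 }
--             }
--         elif parameter.get("value", None) == "x-006":
--             return {
--                 "response": {
--                     "pendingDocuments": "Vendor Drawing"
--                 }
--             }
--         else:
--             return {
--                 "response": {
--                     "pendingDocuments": ""
--                 }
--             }
-- ===== SOURCE B (Python) =====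
-- def outstanding_paperwork(parameters):
--     # Different decomposition: first a whole-list map building the response for
--     # EVERY parameter (valid since each element fully determines its response),
--     # then a separate head-extraction stage; no early-return branching chain.
--     responses = [
--         {"response": {"pendingDocuments":
--             "Vendor Drawing" if p.get("value", None) in ("x-857", "x-006") else ""}}
--         for p in parameters
--     ]
--     return responses[0] if responses else None
-- ===== Notes on version B (the rewrite author's own statement) =====
-- stated objective: alternative
-- what changed: A is an early-return loop with a three-way if/elif/else chain; B is two staged passes: a whole-list map producing each element's response (membership test against the pair of trigger values), followed by a separate head-extraction step.
-- outside the precondition, e.g. on outstanding_paperwork([]): A returns None, B returns None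
import Mathlib
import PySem

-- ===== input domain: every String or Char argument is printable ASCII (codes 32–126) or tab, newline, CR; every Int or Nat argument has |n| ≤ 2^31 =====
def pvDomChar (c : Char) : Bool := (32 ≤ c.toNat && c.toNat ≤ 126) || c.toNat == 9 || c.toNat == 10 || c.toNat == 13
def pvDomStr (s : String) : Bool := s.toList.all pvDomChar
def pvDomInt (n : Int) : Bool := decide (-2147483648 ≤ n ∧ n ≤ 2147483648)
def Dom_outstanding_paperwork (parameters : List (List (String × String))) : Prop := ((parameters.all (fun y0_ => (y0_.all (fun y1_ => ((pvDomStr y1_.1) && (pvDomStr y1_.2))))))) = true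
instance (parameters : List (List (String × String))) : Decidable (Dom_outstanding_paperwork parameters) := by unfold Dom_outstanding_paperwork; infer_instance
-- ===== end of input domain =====

-- B replaces A's early-return loop with if/elif/else by two staged passes (map every
-- element to its response, then take the head); objective: alternative decomposition.

-- ===== PORT A =====
-- A's for-loop returns on every branch of its body, so only the first element is ever
-- inspected; the loop is ported as a match that falls through only on the empty list
-- (where Python A returns None — excluded by Pre_; [] is a placeholder there).
def outstanding_paperwork (parameters : List (List (String × String))) : List (String × List (String × String)) :=
  match parameters with
  | [] => []
  | parameter :: _ =>
    if (PySem.Dict.mk parameter).get? "value" == some "x-857" then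
      [("response", [("pendingDocuments", "Vendor Drawing")])]
    else if (PySem.Dict.mk parameter).get? "value" == some "x-006" then
      [("response", [("pendingDocuments", "Vendor Drawing")])]
    else
      [("response", [("pendingDocuments", "")])]

-- ===== PORT B =====
-- Stage 1: comprehension mapping every parameter to its response dict.
def pvPerParamResponse (p : List (String × String)) : List (String × List (String × String)) :=
  [("response", [("pendingDocuments",
    if (PySem.Dict.mk p).get? "value" == some "x-857" ||
       (PySem.Dict.mk p).get? "value" == some "x-006" then "Vendor Drawing" else "")])]

def outstanding_paperwork_alt (parameters : List (List (String × String))) : List (String × List (String × String)) :=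
  let responses := parameters.map pvPerParamResponse
  -- Stage 2: responses[0] if responses else None (None excluded by Pre_; [] placeholder)
  match responses.head? with
  | some r => r
  | none => []

-- ===== PRECONDITION & SPEC =====
-- Pre_ excludes the empty list, on which Python A (and B) return None, not a dict.
def Pre_outstanding_paperwork (parameters : List (List (String × String))) : Prop := parameters ≠ []
instance (parameters : List (List (String × String))) : Decidable (Pre_outstanding_paperwork parameters) := by unfold Pre_outstanding_paperwork; infer_instance

def pvWitness_outstanding_paperwork : (List (List (String × String))) := [[("value", "x-857")]]

def Spec_outstanding_paperwork (parameters : List (List (String × String))) (out : List (String × List (String × String))) : Prop := out = outstanding_paperwork_alt parameters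
instance (parameters : List (List (String × String))) (out : List (String × List (String × String))) : Decidable (Spec_outstanding_paperwork parameters out) := by unfold Spec_outstanding_paperwork; infer_instance

-- ===== CLAIM =====
def Claim_equal_outstanding_paperwork : Prop := ∀ (parameters : List (List (String × String))), Dom_outstanding_paperwork parameters → Pre_outstanding_paperwork parameters → Spec_outstanding_paperwork parameters (outstanding_paperwork parameters)

-- ===== LEMMAS AND PROOFS =====
theorem outstanding_paperwork_agree (parameters : List (List (String × String)))
    (h : parameters ≠ []) :
    outstanding_paperwork parameters = outstanding_paperwork_alt parameters := by
  match parameters with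
  | [] => exact absurd rfl h
  | first :: rest =>
    simp only [outstanding_paperwork, outstanding_paperwork_alt, List.map_cons, List.head?,
      pvPerParamResponse]
    by_cases h1 : (PySem.Dict.mk first).get? "value" == some "x-857"
    · simp [h1]
    · by_cases h2 : (PySem.Dict.mk first).get? "value" == some "x-006"
      · simp [h1, h2]
      · simp [h1, h2]

-- ===== VERDICT =====
theorem outstanding_paperwork_spec : Claim_equal_outstanding_paperwork := by
  intro parameters _ hpre
  exact outstanding_paperwork_agree parameters hpre
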